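-- pv_equiv track=rewrite | github.com/caelum1125/CSE476Final | solver_agent.py | _answer_looks_empty
-- ===== SOURCE A (Python) =====
-- def _answer_looks_empty(answer: str) -> bool:
--     if not answer:
--         return True
--     refusal_phrases = [
--         "cannot be determined", "not enough information",
--         "no information", "does not contain", "cannot determine",
--         "i don't know", "not mentioned", "not provided",
--         "not_found", "not found",
--     ]
--     return any(p in answer.lower() for p in refusal_phrases)
-- ===== SOURCE B (Python) =====
-- _REFUSAL_PHRASES = [
--     "cannot be determined", "not enough information",
--     "no information", "does not contain", "cannot determine",
--     "i don't know", "not mentioned", "not provided",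
--     "not_found", "not found",
-- ]
--
--
-- def _answer_looks_empty(answer: str) -> bool:
--     if not answer:
--         return True
--     low = answer.lower()
--     # single left-to-right scan: at each position, check whether any phrase starts there
--     for i in range(len(low)):
--         if any(low.startswith(p, i) for p in _REFUSAL_PHRASES):
--             return True
--     return False
-- ===== Notes on version B (the rewrite author's own statement) =====
-- stated objective: alternative
-- what changed: Replaced the phrase-major scan (substring test 'p in low' per phrase) by a single position-major left-to-right scan that at each position checks whether any refusal phrase starts there (startswith at offset), with early exit on first match.
import Mathlib
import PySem

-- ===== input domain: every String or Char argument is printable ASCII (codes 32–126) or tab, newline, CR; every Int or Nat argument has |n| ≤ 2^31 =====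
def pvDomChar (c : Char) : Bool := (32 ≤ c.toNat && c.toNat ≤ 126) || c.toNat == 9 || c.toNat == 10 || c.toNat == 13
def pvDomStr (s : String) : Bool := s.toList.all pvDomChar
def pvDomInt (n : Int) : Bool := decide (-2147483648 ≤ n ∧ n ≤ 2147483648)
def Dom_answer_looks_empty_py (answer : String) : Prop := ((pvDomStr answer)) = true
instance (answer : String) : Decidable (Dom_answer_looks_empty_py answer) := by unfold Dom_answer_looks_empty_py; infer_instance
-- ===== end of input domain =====

-- B replaces A's phrase-major 'p in low' scan by one position-major scan (any phrase starting at each position); alternative structure, same cost.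

-- ===== PORT A =====
-- the refusal_phrases list of A, as lists of chars
def pvPhrases : List (List Char) :=
  [ "cannot be determined".toList, "not enough information".toList,
    "no information".toList, "does not contain".toList, "cannot determine".toList,
    "i don't know".toList, "not mentioned".toList, "not provided".toList,
    "not_found".toList, "not found".toList ]

def answer_looks_empty_py (answer : String) : Bool :=
  if answer.toList.isEmpty then true
  else pvPhrases.any (fun p => PySem.Chars.isIn p (PySem.Chars.lower answer.toList))

-- ===== PORT B =====
-- B's scan loop: at each position (suffix), does some phrase start here?
def pvScan (s : List Char) : Bool :=
  match s with
  | [] => false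
  | _ :: t => pvPhrases.any (fun p => p.isPrefixOf s) || pvScan t

def answer_looks_empty_py_alt (answer : String) : Bool :=
  if answer.toList.isEmpty then true
  else pvScan (PySem.Chars.lower answer.toList)

-- ===== PRECONDITION & SPEC =====
def Spec_answer_looks_empty_py (answer : String) (out : Bool) : Prop := out = answer_looks_empty_py_alt answer
instance (answer : String) (out : Bool) : Decidable (Spec_answer_looks_empty_py answer out) := by unfold Spec_answer_looks_empty_py; infer_instance

-- ===== CLAIM (what is proved, stated in full; the proofs are below) =====
def Claim_equal_answer_looks_empty_py : Prop := ∀ (answer : String), Dom_answer_looks_empty_py answer → Spec_answer_looks_empty_py answer (answer_looks_empty_py answer)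

-- ===== LEMMAS AND PROOFS =====

lemma pvPhrases_ne_nil : ∀ p ∈ pvPhrases, p ≠ [] := by decide

-- the position scan finds exactly the phrases that occur as an infix
lemma pvScan_iff (s : List Char) :
    pvScan s = true ↔ ∃ p ∈ pvPhrases, p <:+: s := by
  induction s with
  | nil =>
    simp only [pvScan]
    constructor
    · intro h; cases h
    · rintro ⟨p, hp, hinf⟩
      exact absurd (List.eq_nil_of_infix_nil hinf) (pvPhrases_ne_nil p hp)
  | cons c t ih =>
    simp only [pvScan, Bool.or_eq_true, List.any_eq_true, ih]
    constructor
    · rintro (⟨p, hp, hpre⟩ | ⟨p, hp, hinf⟩)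
      · exact ⟨p, hp, (List.isPrefixOf_iff_prefix.mp hpre).isInfix⟩
      · exact ⟨p, hp, hinf.trans (List.suffix_cons c t).isInfix⟩
    · rintro ⟨p, hp, ⟨pre, suf, heq⟩⟩
      cases pre with
      | nil =>
        left; exact ⟨p, hp, List.isPrefixOf_iff_prefix.mpr ⟨suf, by simpa using heq⟩⟩
      | cons a pre' =>
        right
        refine ⟨p, hp, pre', suf, ?_⟩
        injection heq with _ h2

lemma pvScan_eq_any (s : List Char) :
    pvScan s = pvPhrases.any (fun p => PySem.Chars.isIn p s) := by
  by_cases h : pvScan s = true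
  · rw [h]
    obtain ⟨p, hp, hinf⟩ := (pvScan_iff s).mp h
    symm
    simp only [List.any_eq_true]
    exact ⟨p, hp, (PySem.Chars.isIn_iff_infix p s).mpr hinf⟩
  · rw [Bool.eq_false_iff.mpr h]
    symm
    rw [Bool.eq_false_iff]
    intro hc
    obtain ⟨p, hp, hin⟩ := List.any_eq_true.mp hc
    exact h ((pvScan_iff s).mpr ⟨p, hp, (PySem.Chars.isIn_iff_infix p s).mp hin⟩)

-- ===== VERDICT (by name: the statement is the Claim_ definition above) =====
theorem answer_looks_empty_py_spec : Claim_equal_answer_looks_empty_py := by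
  intro answer _
  unfold Spec_answer_looks_empty_py answer_looks_empty_py answer_looks_empty_py_alt
  split_ifs with h
  · rfl
  · exact (pvScan_eq_any _).symm
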